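-- pv_equiv track=rewrite | github.com/HelloMinchan/problem-solving | programmers/[1차] 비밀지도/solution.py | solution
-- ===== SOURCE A (Python) =====
-- def solution(n, arr1, arr2):
--     answer = []
--
--     for i in range(n):
--         b1 = format(arr1[i], 'b')
--         if len(b1) != n:
--             while len(b1) != n:
--                 b1 = "0" + b1
--
--         b2 = format(arr2[i], 'b')
--         if len(b2) != n:
--             while len(b2) != n:
--                 b2 = "0" + b2
--
--         s = ""
--         for j in range(n):
--             if b1[j] == "1" or b2[j] == "1":
--                 s += "#"
--             else:
--                 s += " "
--
--         answer.append(s)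
--
--     return answer
-- ===== SOURCE B (Python) =====
-- TRANS = str.maketrans("10", "# ")
--
--
-- def solution(n, arr1, arr2):
--     return [format(arr1[i] | arr2[i], "0%db" % n).translate(TRANS)
--             for i in range(n)]
-- ===== Notes on version B (the rewrite author's own statement) =====
-- stated objective: simpler
-- what changed: Replaces the per-row manual zero-padding while-loop and the per-column character-comparison loop with one integer OR per row, formatted once as an n-bit zero-padded binary string and transformed by a single bulk str.translate; Pre_ excludes entries >= 2**n (or negatives of magnitude >= 2**(n-1)), where A's padding loop never terminates, and rows with negative entries, an unspecified corner where A pads zeros around a '-' sign character while B keeps Python's signed binary rendering.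
-- outside the precondition, e.g. on solution(2, [-1, 0], [0, 0]): A returns [' #', '  '], B returns ['-#', '  ']
import Mathlib
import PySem

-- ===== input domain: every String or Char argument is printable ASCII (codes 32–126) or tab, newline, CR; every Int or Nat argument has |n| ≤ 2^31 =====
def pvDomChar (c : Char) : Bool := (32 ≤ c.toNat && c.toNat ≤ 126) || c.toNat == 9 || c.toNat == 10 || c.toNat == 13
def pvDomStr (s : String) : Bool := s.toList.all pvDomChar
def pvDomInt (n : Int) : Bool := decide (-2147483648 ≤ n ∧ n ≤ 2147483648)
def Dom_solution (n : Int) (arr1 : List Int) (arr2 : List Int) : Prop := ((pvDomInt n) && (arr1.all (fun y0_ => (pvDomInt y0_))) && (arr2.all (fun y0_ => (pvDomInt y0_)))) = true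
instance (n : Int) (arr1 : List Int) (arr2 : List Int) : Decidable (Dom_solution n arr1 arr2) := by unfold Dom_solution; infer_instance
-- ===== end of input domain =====

-- B replaces A's manual zero-padding while-loop and per-column comparison loop by one
-- integer OR per row, formatted once as an n-bit zero-padded binary string and turned
-- into '#'/' ' by one bulk character translation (objective: simpler).

-- ===== PORT A =====

-- format(x, 'b') for a Nat: Python's minimal binary digit string (no PySem primitive;
-- exact hand port of CPython's binary formatting of a non-negative int).
def natBin (x : Nat) : List Char :=
  if _h : x < 2 then [if x = 1 then '1' else '0']
  else natBin (x / 2) ++ [if x % 2 = 1 then '1' else '0']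
decreasing_by exact Nat.div_lt_self (by omega) (by omega)

-- format(x, 'b') on Int: '-' prefix for negatives, exact as CPython.
def pyFormatB (x : Int) : List Char :=
  if x < 0 then '-' :: natBin (-x).toNat else natBin x.toNat

-- Python: `if len(b) != n: while len(b) != n: b = "0" + b` — prepends zeros until the
-- length is n; when len b > n Python diverges (excluded by Pre_), here it returns b.
def padLoop (n : Nat) (b : List Char) : List Char :=
  List.replicate (n - b.length) '0' ++ b

def solution (n : Int) (arr1 : List Int) (arr2 : List Int) : List String :=
  (List.range n.toNat).foldl (fun (answer : List String) (i : Nat) =>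
    let b1 := padLoop n.toNat (pyFormatB (PySem.List.pyGetD arr1 (i : Int) 0))
    let b2 := padLoop n.toNat (pyFormatB (PySem.List.pyGetD arr2 (i : Int) 0))
    let s := (List.range n.toNat).foldl (fun (s : List Char) (j : Nat) =>
      s ++ [if PySem.List.pyGetD b1 (j : Int) ' ' = '1' ∨ PySem.List.pyGetD b2 (j : Int) ' ' = '1'
            then '#' else ' ']) ([] : List Char)
    answer ++ [String.ofList s]) []

-- ===== PORT B =====

-- str.maketrans("10", "# ") / translate, one character.
def trChar (c : Char) : Char := if c = '1' then '#' else if c = '0' then ' ' else c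

-- format(v, f'0{n}b'): zero-padded to width n, exact as CPython (sign before the zeros).
def fmt0nb (n : Nat) (v : Int) : List Char :=
  if v < 0 then '-' :: (List.replicate (n - 1 - (natBin (-v).toNat).length) '0' ++ natBin (-v).toNat)
  else List.replicate (n - (natBin v.toNat).length) '0' ++ natBin v.toNat

def solution_alt (n : Int) (arr1 : List Int) (arr2 : List Int) : List String :=
  (PySem.List.pyRange 0 n 1).map (fun i =>
    String.ofList ((fmt0nb n.toNat
      (PySem.Int.bor (PySem.List.pyGetD arr1 i 0) (PySem.List.pyGetD arr2 i 0))).map trChar))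

-- ===== PRECONDITION & SPEC =====
-- Pre_ keeps the problem's natural domain: rows of length ≥ n with entries 0 ≤ v < 2^n.
-- It excludes rows shorter than n (A raises IndexError), entries whose format(·,'b')
-- string is longer than n (there A's zero-padding while-loop never terminates), and
-- rows with a negative entry — an unspecified corner where A's value (zeros padded
-- around a '-' sign character, the sign column compared like a digit) and B's value
-- (Python's signed n-width binary rendering) are both accidental renderings no one
-- would specify.
-- (the 'min' bounds only keep the condition cheap to decide for huge n: under the two
-- length conjuncts, min n.toNat arr1.length = min n.toNat arr2.length = n.toNat)
def Pre_solution (n : Int) (arr1 : List Int) (arr2 : List Int) : Prop :=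
  n.toNat ≤ arr1.length ∧ n.toNat ≤ arr2.length ∧
  ∀ i < min n.toNat arr1.length,
    0 ≤ arr1.getD i 0 ∧ arr1.getD i 0 < 2 ^ min n.toNat arr1.length ∧
    0 ≤ arr2.getD i 0 ∧ arr2.getD i 0 < 2 ^ min n.toNat arr2.length
instance (n : Int) (arr1 : List Int) (arr2 : List Int) : Decidable (Pre_solution n arr1 arr2) := by
  unfold Pre_solution; infer_instance

def pvWitness_solution : Int × List Int × List Int := (3, [4, 1, 6], [2, 2, 2])

def Spec_solution (n : Int) (arr1 : List Int) (arr2 : List Int) (out : List String) : Prop := out = solution_alt n arr1 arr2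
instance (n : Int) (arr1 : List Int) (arr2 : List Int) (out : List String) : Decidable (Spec_solution n arr1 arr2 out) := by unfold Spec_solution; infer_instance

-- ===== CLAIM (what is proved, stated in full; the proofs are below) =====
def Claim_equal_solution : Prop := ∀ (n : Int) (arr1 : List Int) (arr2 : List Int), Dom_solution n arr1 arr2 → Pre_solution n arr1 arr2 → Spec_solution n arr1 arr2 (solution n arr1 arr2)

-- ===== LEMMAS AND PROOFS =====

theorem map_range_const {α : Type} (m : Nat) (f : Nat → α) (c : α) (h : ∀ j < m, f j = c) :
    (List.range m).map f = List.replicate m c := by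
  rw [List.eq_replicate_iff]
  refine ⟨by simp, ?_⟩
  intro b hb
  obtain ⟨j, hj, rfl⟩ := List.mem_map.mp hb
  exact h j (List.mem_range.mp hj)

theorem testBit_of_lt_two (x k : Nat) (hx : x < 2) (hk : 1 ≤ k) : x.testBit k = false := by
  have h2 : (2 : Nat) ≤ 2 ^ k := by
    calc (2 : Nat) = 2 ^ 1 := rfl
    _ ≤ 2 ^ k := Nat.pow_le_pow_right (by norm_num) hk
  exact Nat.testBit_eq_false_of_lt (by omega)

-- the padded minimal binary string of x < 2^(m+1) is its (m+1)-bit rendering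
theorem bin_pad (m : Nat) : ∀ x : Nat, x < 2 ^ (m + 1) →
    List.replicate (m + 1 - (natBin x).length) '0' ++ natBin x
      = (List.range (m + 1)).map (fun j => if x.testBit (m - j) then '1' else '0') := by
  induction m with
  | zero =>
    intro x hx
    have : x = 0 ∨ x = 1 := by omega
    rcases this with rfl | rfl <;>
      simp [natBin, List.range_succ]
  | succ k ih =>
    intro x hx
    rw [List.range_succ, List.map_append]
    by_cases hx2 : x < 2
    · rw [natBin, dif_pos hx2]
      rw [map_range_const (k + 1) _ '0'
        (by intro j hj
            have h1 : 1 ≤ k + 1 - j := by omega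
            have : x.testBit (k + 1 - j) = false := testBit_of_lt_two x _ hx2 h1
            simp [this])]
      have hc : (k + 1 + 1) - ([if x = 1 then '1' else '0'] : List Char).length = k + 1 := by
        simp
      rw [hc]
      congr 1
      have : x = 0 ∨ x = 1 := by omega
      rcases this with rfl | rfl <;> simp
    · rw [natBin, dif_neg hx2]
      have hlen : (natBin (x / 2) ++ [if x % 2 = 1 then '1' else '0']).length
          = (natBin (x / 2)).length + 1 := by simp
      have hdiv : x / 2 < 2 ^ (k + 1) := by
        have h2 : 2 ^ (k + 1 + 1) = 2 ^ (k + 1) * 2 := pow_succ 2 (k + 1)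
        omega
      have hsub : k + 1 + 1 - (natBin (x / 2) ++ [if x % 2 = 1 then '1' else '0']).length
          = k + 1 - (natBin (x / 2)).length := by omega
      rw [hsub, ← List.append_assoc, ih (x / 2) hdiv]
      congr 1
      · apply List.map_congr_left
        intro j hj
        have hj' : j < k + 1 := List.mem_range.mp hj
        have : k + 1 - j = (k - j) + 1 := by omega
        rw [this, Nat.testBit_add_one]
      · simp only [List.map_cons, List.map_nil, Nat.sub_self, Nat.testBit_zero]
        rcases Nat.mod_two_eq_zero_or_one x with h | h <;> simp [h]

-- column j of A's padded string for 0 ≤ v < 2^(m+1) is '1' exactly at bit (m - j) of v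
theorem digit_pad (m : Nat) (v : Int) (h0 : 0 ≤ v)
    (hv : v < 2 ^ (m + 1)) (j : Nat) (hj : j < m + 1) :
    ((padLoop (m + 1) (pyFormatB v)).getD j ' ' = '1') ↔ v.toNat.testBit (m - j) = true := by
  rw [pyFormatB, if_neg (by omega)]
  have hcast : ((2:Int))^(m+1) = ((2^(m+1) : Nat) : Int) := by push_cast; ring
  rw [hcast] at hv
  have hvn : v.toNat < 2 ^ (m + 1) := by omega
  unfold padLoop
  rw [bin_pad m v.toNat hvn]
  rw [List.getD_eq_getElem _ _ (by simpa using hj)]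
  simp only [List.getElem_map, List.getElem_range]
  rcases v.toNat.testBit (m - j) <;> simp

-- one row: A's two padded strings compared column by column equal B's translated OR string
theorem row_eq (m : Nat) (a b : Int) (ha0 : 0 ≤ a) (hb0 : 0 ≤ b)
    (ha : a < 2 ^ (m + 1)) (hb : b < 2 ^ (m + 1)) :
    (List.range (m + 1)).foldl (fun (s : List Char) (j : Nat) =>
        s ++ [if (padLoop (m + 1) (pyFormatB a)).getD j ' ' = '1'
               ∨ (padLoop (m + 1) (pyFormatB b)).getD j ' ' = '1'
              then '#' else ' ']) ([] : List Char)
      = (fmt0nb (m + 1) (PySem.Int.bor a b)).map trChar := by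
  rw [PySem.Int.bor_of_nonneg ha0 hb0, fmt0nb,
    if_neg (not_lt.mpr (Int.natCast_nonneg _))]
  have hcast : ((2:Int))^(m+1) = ((2^(m+1) : Nat) : Int) := by push_cast; ring
  rw [hcast] at ha hb
  have ha' : a.toNat < 2 ^ (m + 1) := by omega
  have hb' : b.toNat < 2 ^ (m + 1) := by omega
  have horlt : a.toNat ||| b.toNat < 2 ^ (m + 1) := Nat.or_lt_two_pow ha' hb'
  rw [Int.toNat_natCast, bin_pad m _ horlt,
    PySem.List.foldl_append_singleton_eq_map, List.nil_append, List.map_map]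
  apply List.map_congr_left
  intro j hj
  have hj' : j < m + 1 := List.mem_range.mp hj
  simp only [Function.comp, Nat.testBit_lor]
  have hha := digit_pad m a ha0 ha j hj'
  have hhb := digit_pad m b hb0 hb j hj'
  rcases hta : a.toNat.testBit (m - j) <;> rcases htb : b.toNat.testBit (m - j) <;>
    · rw [hta] at hha
      rw [htb] at hhb
      simp only [hha, hhb]
      simp [trChar]

-- ===== VERDICT (by name: the statement is the Claim_ definition above) =====
set_option maxHeartbeats 1000000 in
theorem solution_spec : Claim_equal_solution := by
  intro n arr1 arr2 _ hpre
  obtain ⟨h1, h2, hv0⟩ := hpre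
  have e1 : min n.toNat arr1.length = n.toNat := Nat.min_eq_left h1
  have e2 : min n.toNat arr2.length = n.toNat := Nat.min_eq_left h2
  rw [e1, e2] at hv0
  unfold Spec_solution solution solution_alt
  rw [PySem.List.pyRange_zero, List.map_map,
    PySem.List.foldl_append_singleton_eq_map, List.nil_append]
  apply List.map_congr_left
  intro i hi
  have hi' : i < n.toNat := List.mem_range.mp hi
  obtain ⟨m, hm⟩ : ∃ m, n.toNat = m + 1 := ⟨n.toNat - 1, by omega⟩
  obtain ⟨hA1, hA2, hB1, hB2⟩ := hv0 i (by omega)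
  simp only [Function.comp, PySem.List.pyGetD_natCast]
  rw [hm] at hA2 hB2 ⊢
  exact congrArg String.ofList (row_eq m _ _ hA1 hB1 hA2 hB2)
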